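-- pv_equiv track=rewrite | github.com/oopt-goldstone/goldstone-mgmt | src/south/ocnos/goldstone/south/ocnos/util.py | get_all_trunk_vlans_id
-- ===== SOURCE A (Python) =====
-- def get_all_trunk_vlans_id(trunk_vlans):
--     trunk_vlans_set = set(trunk_vlans.split(","))
--     multi_vlans = set(v for v in trunk_vlans_set if "-" in v)
--     trunk_vlans_set = trunk_vlans_set - multi_vlans
--     for m in multi_vlans:
--         trunk_vlans_set = trunk_vlans_set | set(
--             range(int(m.split("-")[0]), int(m.split("-")[1]) + 1)
--         )
--     ret = sorted([int(t) for t in trunk_vlans_set])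
--     return ret
-- ===== SOURCE B (Python) =====
-- def get_all_trunk_vlans_id(trunk_vlans):
--     # Interval sweep: parse every token into a (lo, hi) interval (a single VLAN v
--     # becomes (v, v)), sort the intervals by lower bound, then merge-emit the ids
--     # in one sweep -- no sets anywhere; duplicates collapse by construction.
--     intervals = []
--     for tok in trunk_vlans.split(","):
--         if "-" in tok:
--             parts = tok.split("-")
--             intervals.append((int(parts[0]), int(parts[1])))
--         else:
--             v = int(tok)
--             intervals.append((v, v))
--     intervals.sort(key=lambda p: p[0])
--     result = []
--     cur = None  # highest id emitted so far
--     for lo, hi in intervals: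
--         if hi < lo:
--             continue
--         if cur is None or lo > cur:
--             result.extend(range(lo, hi + 1))
--             cur = hi
--         elif hi > cur:
--             result.extend(range(cur + 1, hi + 1))
--             cur = hi
--     return result
-- ===== Notes on version B (the rewrite author's own statement) =====
-- stated objective: alternative
-- what changed: B parses every token into a (lo,hi) interval (singles become (v,v)), sorts the intervals by lower bound, and merges them in one sweep that emits the ids in increasing order - no set is ever built, replacing A's mixed string/int set with set-difference and per-range unions followed by a final sort of the whole expansion.
-- intended difference: On specs where a single token's value also falls in some listed range (or two textually different single tokens denote the same number, e.g. '1-3,2' or '01,1'), A returns the value twice ([1,2,2,3]) because it keeps unparsed strings and range ints in one mixed set that cannot merge them; B returns each VLAN id once ([1,2,3]), the evident intent of expanding a trunk-VLAN spec. — e.g. on get_all_trunk_vlans_id("1-3,2"): A returns [1, 2, 2, 3], B returns [1, 2, 3]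
import Mathlib
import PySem

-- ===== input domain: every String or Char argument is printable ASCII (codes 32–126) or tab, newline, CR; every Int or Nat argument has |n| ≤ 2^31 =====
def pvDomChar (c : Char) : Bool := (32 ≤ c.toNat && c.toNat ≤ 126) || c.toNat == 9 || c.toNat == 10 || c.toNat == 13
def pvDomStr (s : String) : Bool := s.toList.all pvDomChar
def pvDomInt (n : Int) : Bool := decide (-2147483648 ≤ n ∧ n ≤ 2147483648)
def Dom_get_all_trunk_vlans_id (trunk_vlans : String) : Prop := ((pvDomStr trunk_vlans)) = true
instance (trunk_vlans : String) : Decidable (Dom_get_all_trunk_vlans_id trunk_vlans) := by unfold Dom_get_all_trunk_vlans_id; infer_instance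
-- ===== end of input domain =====

-- B replaces A's mixed string/int set machinery (set difference + per-range unions + final
-- sort) by an interval sweep: every token becomes a (lo, hi) interval, the intervals are
-- sorted by lower bound and merged in one pass that emits the ids in increasing order — no
-- set is ever built; B also dedups across singles and ranges, which A's mixed set cannot
-- (stated as the intended difference D_ below).

-- shared leaf helpers (token-level readings of the input; used by both ports and by D_/Pre_)
-- s.split(",")
def pvToks (s : String) : List String := (PySem.Str.split? s ",").getD []
-- "-" in t
def pvDash (t : String) : Bool := PySem.Str.isIn "-" t
-- int(t); .getD 0 is unreachable under Pre_ (int(t) raises ValueError exactly when ofStr? = none)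
def pvParse (t : String) : Int := (PySem.Int.ofStr? t).getD 0
-- int(m.split("-")[0]) / int(m.split("-")[1]); plain [0]/[1] indexing is exact here:
-- split always yields ≥ 1 part, and ≥ 2 parts when "-" occurs in m (the only use)
def pvLo (m : String) : Int := (PySem.Int.ofStr? (((PySem.Str.split? m "-").getD []).getD 0 "")).getD 0
def pvHi (m : String) : Int := (PySem.Int.ofStr? (((PySem.Str.split? m "-").getD []).getD 1 "")).getD 0

-- ===== PORT A =====
-- A's working set mixes str (unexpanded single tokens) and int (range members); ported as PvTok
inductive PvTok
  | s : String → PvTok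
  | i : Int → PvTok
deriving DecidableEq, Repr
def pvSumDash : PvTok → Bool
  | .s t => pvDash t
  | .i _ => false
def pvSumInt : PvTok → Int   -- int(t): parses a str, identity on an int
  | .s t => pvParse t
  | .i n => n
def pvSumLo : PvTok → Int    -- int(m.split("-")[0]); only ever applied to PvTok.s (members of multi_vlans)
  | .s t => pvLo t
  | .i _ => 0
def pvSumHi : PvTok → Int
  | .s t => pvHi t
  | .i _ => 0

def get_all_trunk_vlans_id (trunk_vlans : String) : List Int :=
  -- trunk_vlans_set = set(trunk_vlans.split(","))
  let tvs0 : PySem.Set PvTok := PySem.Set.ofList ((pvToks trunk_vlans).map PvTok.s)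
  -- multi_vlans = set(v for v in trunk_vlans_set if "-" in v)
  let multi : PySem.Set PvTok := PySem.Set.ofList (tvs0.filter pvSumDash)
  -- trunk_vlans_set = trunk_vlans_set - multi_vlans
  let tvs1 : PySem.Set PvTok := PySem.Set.diff tvs0 multi
  -- for m in multi_vlans: trunk_vlans_set = trunk_vlans_set | set(range(int(m.split("-")[0]), int(m.split("-")[1]) + 1))
  let fin : PySem.Set PvTok := multi.foldl
    (fun acc m => PySem.Set.union acc ((PySem.List.pyRange (pvSumLo m) (pvSumHi m + 1) 1).map PvTok.i)) tvs1
  -- ret = sorted([int(t) for t in trunk_vlans_set])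
  PySem.List.sorted (fin.map pvSumInt) (fun x => x) false

-- ===== PORT B =====
-- intervals = []; for tok in trunk_vlans.split(","): … append((lo, hi) / (v, v))
def pvIntervals (s : String) : List (Int × Int) :=
  (pvToks s).map (fun tok =>
    if pvDash tok then (pvLo tok, pvHi tok) else (pvParse tok, pvParse tok))

-- the merge-emit sweep: for lo, hi in intervals: … ;  cur = highest id emitted so far
def pvSweep : List (Int × Int) → List Int → Option Int → List Int
  | [], res, _ => res
  | (lo, hi) :: rest, res, cur =>
    if hi < lo then pvSweep rest res cur            -- empty interval: continue
    else
      match cur with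
      | none => pvSweep rest (res ++ PySem.List.pyRange lo (hi + 1) 1) (some hi)
      | some c =>
        if c < lo then pvSweep rest (res ++ PySem.List.pyRange lo (hi + 1) 1) (some hi)
        else if c < hi then pvSweep rest (res ++ PySem.List.pyRange (c + 1) (hi + 1) 1) (some hi)
        else pvSweep rest res (some c)

def get_all_trunk_vlans_id_alt (trunk_vlans : String) : List Int :=
  -- intervals.sort(key=lambda p: p[0]); then the sweep starting from result=[], cur=None
  pvSweep (PySem.List.sorted (pvIntervals trunk_vlans) (fun p => p.1) false) [] none

-- ===== PRECONDITION & SPEC =====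
-- Pre_ excludes exactly the inputs where Python A raises ValueError: some comma token is not
-- int-parsable (for a token containing "-", its first two "-"-parts must both parse).
def Pre_get_all_trunk_vlans_id (trunk_vlans : String) : Prop :=
  ∀ t ∈ pvToks trunk_vlans,
    (pvDash t = true →
      ((PySem.Int.ofStr? (((PySem.Str.split? t "-").getD []).getD 0 "")).isSome = true ∧
       (PySem.Int.ofStr? (((PySem.Str.split? t "-").getD []).getD 1 "")).isSome = true)) ∧
    (pvDash t = false → (PySem.Int.ofStr? t).isSome = true)
instance (trunk_vlans : String) : Decidable (Pre_get_all_trunk_vlans_id trunk_vlans) := by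
  unfold Pre_get_all_trunk_vlans_id; infer_instance
def pvWitness_get_all_trunk_vlans_id : String := "1-3,5"

-- On specs where a single token's value also lies in some listed range, or two textually
-- different single tokens denote the same number (e.g. "1-3,2" or "01,1"), A returns that
-- VLAN id twice ([1,2,2,3]) because its mixed str/int set cannot merge them; B returns each
-- id once ([1,2,3]), the evident intent of expanding a trunk-VLAN spec.
def D_get_all_trunk_vlans_id (trunk_vlans : String) : Prop :=
  (¬ (((PySem.Set.ofList ((pvToks trunk_vlans).filter (fun t => !pvDash t))).map pvParse).Nodup)) ∨
  (∃ t ∈ PySem.Set.ofList ((pvToks trunk_vlans).filter (fun t => !pvDash t)),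
     ∃ m ∈ pvToks trunk_vlans, pvDash m = true ∧ pvLo m ≤ pvParse t ∧ pvParse t ≤ pvHi m)
instance (trunk_vlans : String) : Decidable (D_get_all_trunk_vlans_id trunk_vlans) := by
  unfold D_get_all_trunk_vlans_id; infer_instance

def Spec_get_all_trunk_vlans_id (trunk_vlans : String) (out : List Int) : Prop :=
  ¬ D_get_all_trunk_vlans_id trunk_vlans → out = get_all_trunk_vlans_id_alt trunk_vlans
instance (trunk_vlans : String) (out : List Int) : Decidable (Spec_get_all_trunk_vlans_id trunk_vlans out) := by
  unfold Spec_get_all_trunk_vlans_id; infer_instance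

def pvDiffWitness_get_all_trunk_vlans_id : String := "1-3,2"
def pvDiffWitnessOut_get_all_trunk_vlans_id : (List Int) × (List Int) := ([1, 2, 2, 3], [1, 2, 3])

-- ===== CLAIM (what is proved, stated in full; the proofs are below) =====
def Claim_unchanged_get_all_trunk_vlans_id : Prop := ∀ (trunk_vlans : String), Dom_get_all_trunk_vlans_id trunk_vlans → Pre_get_all_trunk_vlans_id trunk_vlans → Spec_get_all_trunk_vlans_id trunk_vlans (get_all_trunk_vlans_id trunk_vlans)
def Claim_changed_get_all_trunk_vlans_id : Prop := Dom_get_all_trunk_vlans_id (pvDiffWitness_get_all_trunk_vlans_id) ∧ Pre_get_all_trunk_vlans_id (pvDiffWitness_get_all_trunk_vlans_id) ∧ D_get_all_trunk_vlans_id (pvDiffWitness_get_all_trunk_vlans_id) ∧ get_all_trunk_vlans_id (pvDiffWitness_get_all_trunk_vlans_id) = pvDiffWitnessOut_get_all_trunk_vlans_id.1 ∧ get_all_trunk_vlans_id_alt (pvDiffWitness_get_all_trunk_vlans_id) = pvDiffWitnessOut_get_all_trunk_vlans_id.2 ∧ pvDiffWitnessOut_get_all_trunk_vlans_id.1 ≠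 pvDiffWitnessOut_get_all_trunk_vlans_id.2
def Claim_exact_get_all_trunk_vlans_id : Prop := ∀ (trunk_vlans : String), Dom_get_all_trunk_vlans_id trunk_vlans → Pre_get_all_trunk_vlans_id trunk_vlans → D_get_all_trunk_vlans_id trunk_vlans → get_all_trunk_vlans_id trunk_vlans ≠ get_all_trunk_vlans_id_alt trunk_vlans

-- ===== LEMMAS AND PROOFS =====

-- helper names for the proofs (proof-only; defined below the claim block)
def pvRange (m : String) : List Int := PySem.List.pyRange (pvLo m) (pvHi m + 1) 1
def pvSingles (s : String) : List String :=
  PySem.Set.ofList ((pvToks s).filter (fun t => !pvDash t))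
def pvDlist (s : String) : List String :=
  (PySem.Set.ofList (pvToks s)).filter (fun t => pvDash t)
def pvStepA (acc : List PvTok) (d : String) : List PvTok :=
  PySem.Set.update acc ((pvRange d).map PvTok.i)
def pvFinA (s : String) : List PvTok :=
  (pvDlist s).foldl pvStepA ((pvSingles s).map PvTok.s)

-- Sum-level BEq agrees with the component BEq
theorem pv_beq_inl (a b : String) : ((PvTok.s a : PvTok) == PvTok.s b) = (a == b) := by
  by_cases h : a = b <;> simp [h]

theorem pv_discard_map (s : List String) (x : String) :
    PySem.Set.discard (s.map (PvTok.s)) (PvTok.s x)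
      = (PySem.Set.discard s x).map PvTok.s := by
  show List.filter _ _ = _
  rw [List.filter_map]
  show _ = List.map _ (List.filter _ _)
  congr 1
  apply List.filter_congr
  intro t _
  simp [Function.comp, pv_beq_inl]

theorem pv_ofList_map (l : List String) :
    PySem.Set.ofList (l.map (PvTok.s))
      = (PySem.Set.ofList l).map PvTok.s := by
  induction l with
  | nil => rfl
  | cons x l ih =>
      rw [List.map_cons, PySem.Set.ofList_cons, PySem.Set.ofList_cons, ih, pv_discard_map,
        List.map_cons]

theorem pv_discard_filter {α : Type} [BEq α] (p : α → Bool) (s : List α) (x : α) :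
    (PySem.Set.discard s x).filter p = PySem.Set.discard (s.filter p) x := by
  show (List.filter _ _).filter _ = List.filter _ _
  rw [List.filter_filter, List.filter_filter]
  apply List.filter_congr
  intro a _
  rw [Bool.and_comm]

theorem pv_discard_of_not_mem {α : Type} [BEq α] [LawfulBEq α] (s : List α) (x : α)
    (h : x ∉ s) : PySem.Set.discard s x = s := by
  show List.filter _ _ = _
  apply List.filter_eq_self.mpr
  intro a ha
  have hne : a ≠ x := fun he => h (he ▸ ha)
  simp [hne]

theorem pv_ofList_filter (p : String → Bool) (l : List String) :
    PySem.Set.ofList (l.filter p) = (PySem.Set.ofList l).filter p := by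
  induction l with
  | nil => rfl
  | cons x l ih =>
      by_cases hp : p x = true
      · rw [List.filter_cons_of_pos hp, PySem.Set.ofList_cons, PySem.Set.ofList_cons,
          List.filter_cons_of_pos hp, ih, pv_discard_filter]
      · rw [List.filter_cons_of_neg (by simpa using hp), PySem.Set.ofList_cons,
          List.filter_cons_of_neg (by simpa using hp), pv_discard_filter, ← ih,
          pv_discard_of_not_mem]
        rw [PySem.Set.mem_ofList]
        intro hx
        exact hp (List.of_mem_filter hx)

-- membership in a contains test, on lists
theorem pv_contains_iff {α : Type} [BEq α] [LawfulBEq α] (l : List α) (x : α) :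
    l.contains x = true ↔ x ∈ l := by simp

-- ===== shape of port A =====
theorem pv_A_shape (s : String) :
    get_all_trunk_vlans_id s
      = PySem.List.sorted ((pvFinA s).map pvSumInt) (fun x => x) false := by
  show PySem.List.sorted _ _ _ = _
  congr 1
  -- tvs0 in mapped form
  have htvs0 : PySem.Set.ofList ((pvToks s).map (PvTok.s))
      = (PySem.Set.ofList (pvToks s)).map PvTok.s := pv_ofList_map _
  -- multi in mapped form
  have hfilt : ((PySem.Set.ofList (pvToks s)).map (PvTok.s)).filter pvSumDash
      = (pvDlist s).map PvTok.s := by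
    rw [List.filter_map]; rfl
  have hmulti : PySem.Set.ofList
        ((PySem.Set.ofList ((pvToks s).map (PvTok.s))).filter pvSumDash)
      = (pvDlist s).map PvTok.s := by
    rw [htvs0, hfilt]
    apply PySem.Set.ofList_eq_self_of_nodup
    exact ((PySem.Set.nodup_ofList _).filter _).map (fun a b h => by injection h)
  -- tvs1 in mapped form
  have htvs1 : PySem.Set.diff (PySem.Set.ofList ((pvToks s).map (PvTok.s)))
        (PySem.Set.ofList ((PySem.Set.ofList ((pvToks s).map (PvTok.s))).filter pvSumDash))
      = (pvSingles s).map PvTok.s := by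
    rw [hmulti]
    show List.filter _ _ = _
    rw [htvs0]
    have hcongr : ∀ y ∈ (PySem.Set.ofList (pvToks s)).map (PvTok.s),
        (!PySem.Set.contains ((pvDlist s).map (PvTok.s)) y) = !pvSumDash y := by
      intro y hy
      obtain ⟨t, ht, rfl⟩ := List.mem_map.mp hy
      show (!((pvDlist s).map PvTok.s).contains (PvTok.s t)) = !pvDash t
      congr 1
      by_cases hd : pvDash t = true
      · rw [hd]
        exact (pv_contains_iff _ _).mpr (List.mem_map_of_mem (List.mem_filter.mpr ⟨ht, hd⟩))
      · have hf : pvDash t = false := by simpa using hd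
        rw [hf]
        refine Bool.eq_false_iff.mpr (fun hc => ?_)
        obtain ⟨u, hu, he⟩ := List.mem_map.mp ((pv_contains_iff _ _).mp hc)
        injection he with he'
        subst he'
        exact absurd (List.mem_filter.mp hu).2 (by simp [hf])
    rw [List.filter_congr hcongr, List.filter_map]
    unfold pvSingles
    rw [pv_ofList_filter]
    rfl
  rw [htvs1, hmulti, List.foldl_map]
  rfl

-- ===== membership in A's fold =====
theorem pv_foldA_mem (ds : List String) (acc : List PvTok) (y : PvTok) :
    y ∈ ds.foldl pvStepA acc ↔ y ∈ acc ∨ ∃ d ∈ ds, y ∈ (pvRange d).map PvTok.i := by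
  induction ds generalizing acc with
  | nil => simp
  | cons d ds ih =>
      rw [List.foldl_cons, ih]
      unfold pvStepA
      rw [PySem.Set.mem_update]
      constructor
      · rintro (⟨h | h⟩ | ⟨d', hd', hy⟩)
        · exact Or.inl h
        · exact Or.inr ⟨d, List.mem_cons.mpr (Or.inl rfl), h⟩
        · exact Or.inr ⟨d', List.mem_cons_of_mem _ hd', hy⟩
      · rintro (h | ⟨d', hd', hy⟩)
        · exact Or.inl (Or.inl h)
        · rcases List.mem_cons.mp hd' with rfl | hd'
          · exact Or.inl (Or.inr hy)
          · exact Or.inr ⟨d', hd', hy⟩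

-- updating with a list of .i values: nodup of the projection is preserved when no .s
-- member of the accumulator projects into the added values
theorem pv_updInr (xs : List Int) (acc : List PvTok)
    (h1 : acc.Nodup) (h2 : (acc.map pvSumInt).Nodup)
    (h3 : ∀ t, PvTok.s t ∈ acc → pvParse t ∉ xs) :
    (PySem.Set.update acc (xs.map PvTok.i)).Nodup ∧
    (∀ t, PvTok.s t ∈ PySem.Set.update acc (xs.map PvTok.i) ↔ PvTok.s t ∈ acc) ∧
    ((PySem.Set.update acc (xs.map PvTok.i)).map pvSumInt).Nodup := by
  induction xs generalizing acc with
  | nil => exact ⟨h1, fun _ => Iff.rfl, h2⟩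
  | cons x xs ih =>
      rw [List.map_cons, PySem.Set.update_cons]
      by_cases hm : (PvTok.i x : PvTok) ∈ acc
      · rw [PySem.Set.add_of_mem hm]
        exact ih acc h1 h2 (fun t ht => fun hx => h3 t ht (List.mem_cons_of_mem _ hx))
      · rw [PySem.Set.add_of_not_mem hm]
        have hx_notin : x ∉ acc.map pvSumInt := by
          intro hx
          obtain ⟨y, hy, hya⟩ := List.mem_map.mp hx
          cases y with
          | s t =>
              apply h3 t hy
              have he : pvParse t = x := hya
              rw [he]
              exact List.mem_cons.mpr (Or.inl rfl)
          | i n =>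
              have he : n = x := hya
              subst he
              exact hm hy
        have h1' : (acc ++ [PvTok.i x]).Nodup := by
          rw [List.nodup_append]
          refine ⟨h1, by simp, ?_⟩
          intro a ha b hb
          rcases List.mem_cons.mp hb with rfl | hb
          · intro he
            subst he
            exact hm ha
          · simp at hb
        have h2' : ((acc ++ [PvTok.i x]).map pvSumInt).Nodup := by
          rw [List.map_append, List.nodup_append]
          refine ⟨h2, by simp, ?_⟩
          intro a ha b hb
          rw [List.map_cons, List.map_nil] at hb
          rcases List.mem_cons.mp hb with rfl | hb
          · intro he
            subst he
            exact hx_notin ha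
          · simp at hb
        have h3' : ∀ t, PvTok.s t ∈ acc ++ [PvTok.i x] → pvParse t ∉ xs := by
          intro t ht
          rcases List.mem_append.mp ht with ht | ht
          · exact fun hx => h3 t ht (List.mem_cons_of_mem _ hx)
          · simp at ht
        obtain ⟨n1, n2, n3⟩ := ih (acc ++ [PvTok.i x]) h1' h2' h3'
        refine ⟨n1, ?_, n3⟩
        intro t
        rw [n2 t, List.mem_append]
        simp

-- A's fold: nodup of the projection
theorem pv_foldA_nodup (ds : List String) (acc : List PvTok)
    (h1 : acc.Nodup) (h2 : (acc.map pvSumInt).Nodup)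
    (h3 : ∀ t, PvTok.s t ∈ acc → ∀ d ∈ ds, pvParse t ∉ pvRange d) :
    (ds.foldl pvStepA acc).Nodup ∧ ((ds.foldl pvStepA acc).map pvSumInt).Nodup := by
  induction ds generalizing acc with
  | nil => exact ⟨h1, h2⟩
  | cons d ds ih =>
      rw [List.foldl_cons]
      obtain ⟨n1, n2, n3⟩ := pv_updInr (pvRange d) acc h1 h2
        (fun t ht => h3 t ht d (List.mem_cons.mpr (Or.inl rfl)))
      exact ih _ n1 n3 (fun t ht d' hd' => h3 t ((n2 t).mp ht) d' (List.mem_cons_of_mem _ hd'))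

-- the accumulator is a prefix of the fold's result
theorem pv_add_prefix {α : Type} [BEq α] (s : PySem.Set α) (x : α) : s <+: PySem.Set.add s x := by
  show s <+: (if _ then _ else _)
  split
  · exact List.prefix_refl s
  · exact List.prefix_append s [x]

theorem pv_update_prefix {α : Type} [BEq α] (xs : List α) (s : PySem.Set α) :
    s <+: PySem.Set.update s xs := by
  induction xs generalizing s with
  | nil => exact List.prefix_refl s
  | cons x xs ih => exact (pv_add_prefix s x).trans (ih (PySem.Set.add s x))

theorem pv_foldA_prefix (ds : List String) (acc : List PvTok) :
    acc <+: ds.foldl pvStepA acc := by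
  induction ds generalizing acc with
  | nil => exact List.prefix_refl acc
  | cons d ds ih =>
      rw [List.foldl_cons]
      exact (pv_update_prefix _ _).trans (ih (pvStepA acc d))

-- pvSingles / pvDlist read off the tokens
theorem pv_mem_singles (s : String) (t : String) :
    t ∈ pvSingles s ↔ t ∈ pvToks s ∧ pvDash t = false := by
  unfold pvSingles
  rw [PySem.Set.mem_ofList, List.mem_filter]
  simp

theorem pv_mem_dlist (s : String) (d : String) :
    d ∈ pvDlist s ↔ d ∈ pvToks s ∧ pvDash d = true := by
  unfold pvDlist
  rw [List.mem_filter, PySem.Set.mem_ofList]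

theorem pv_mem_range (m : String) (x : Int) :
    x ∈ pvRange m ↔ pvLo m ≤ x ∧ x ≤ pvHi m := by
  unfold pvRange
  rw [PySem.List.mem_pyRange_one]
  omega

-- initial state of A's fold
theorem pv_singles_map (s : String) :
    ((pvSingles s).map (PvTok.s)).map pvSumInt
      = (pvSingles s).map pvParse := by
  rw [List.map_map]; rfl

theorem pv_nodup_singles_inl (s : String) :
    ((pvSingles s).map (PvTok.s)).Nodup :=
  (PySem.Set.nodup_ofList _).map (fun a b h => by injection h)

-- ===== B side: the sweep invariant =====
-- After sorting by lower bound, the sweep emits a strictly increasing list whose members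
-- are exactly the ids covered by some interval.
theorem pv_sweep_spec (ints : List (Int × Int)) (res : List Int) (cur : Option Int)
    (hsort : ints.Pairwise (fun p q => p.1 ≤ q.1))
    (hres : res.Pairwise (· < ·))
    (hnone : cur = none → res = [])
    (hsome : ∀ c, cur = some c → (∀ x ∈ res, x ≤ c) ∧
        (∀ p ∈ ints, ∀ x : Int, p.1 ≤ x → x ≤ c → x ∈ res)) :
    (pvSweep ints res cur).Pairwise (· < ·) ∧
    (∀ x, x ∈ pvSweep ints res cur ↔ x ∈ res ∨ ∃ p ∈ ints, p.1 ≤ x ∧ x ≤ p.2) := by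
  induction ints generalizing res cur with
  | nil => simp [pvSweep, hres]
  | cons p rest ih =>
      obtain ⟨lo, hi⟩ := p
      rw [List.pairwise_cons] at hsort
      by_cases hempty : hi < lo
      · -- empty interval: skipped
        rw [show pvSweep ((lo, hi) :: rest) res cur = pvSweep rest res cur by
          simp [pvSweep, hempty]]
        obtain ⟨hpw, hmem⟩ := ih res cur hsort.2 hres hnone
          (fun c hc => ⟨(hsome c hc).1, fun q hq => (hsome c hc).2 q (List.mem_cons_of_mem _ hq)⟩)
        refine ⟨hpw, fun x => (hmem x).trans ?_⟩
        constructor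
        · rintro (h | h)
          · exact Or.inl h
          · exact Or.inr (by rcases h with ⟨q, hq, h⟩; exact ⟨q, List.mem_cons_of_mem _ hq, h⟩)
        · rintro (h | ⟨q, hq, hcov⟩)
          · exact Or.inl h
          · rcases List.mem_cons.mp hq with rfl | hq
            · omega
            · exact Or.inr ⟨q, hq, hcov⟩
      · -- nonempty interval: three subcases on cur
        have hle : lo ≤ hi := by omega
        -- generic emit step: res' = res ++ range a (hi+1), new cur = hi
        have emit : ∀ a : Int, a ≤ hi + 1 → lo ≤ a →
            (∀ x ∈ res, x < a) →
            (∀ x : Int, lo ≤ x → x ≤ hi → x < a → x ∈ res) →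
            (pvSweep rest (res ++ PySem.List.pyRange a (hi + 1) 1) (some hi)).Pairwise (· < ·) ∧
            (∀ x, x ∈ pvSweep rest (res ++ PySem.List.pyRange a (hi + 1) 1) (some hi) ↔
              x ∈ res ∨ ∃ q ∈ (lo, hi) :: rest, q.1 ≤ x ∧ x ≤ q.2) := by
          intro a ha ha2 hlt hold
          have hres' : (res ++ PySem.List.pyRange a (hi + 1) 1).Pairwise (· < ·) := by
            rw [List.pairwise_append]
            refine ⟨hres, PySem.List.pairwise_lt_pyRange_one _ _, ?_⟩
            intro x hx y hy
            rw [PySem.List.mem_pyRange_one] at hy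
            have := hlt x hx
            omega
          have hbound : ∀ x ∈ res ++ PySem.List.pyRange a (hi + 1) 1, x ≤ hi := by
            intro x hx
            rcases List.mem_append.mp hx with hx | hx
            · have := hlt x hx; omega
            · rw [PySem.List.mem_pyRange_one] at hx; omega
          have hcover : ∀ q ∈ rest, ∀ x : Int, q.1 ≤ x → x ≤ hi →
              x ∈ res ++ PySem.List.pyRange a (hi + 1) 1 := by
            intro q hq x hqx hxhi
            have hloq : lo ≤ q.1 := hsort.1 q hq
            by_cases hxa : a ≤ x
            · exact List.mem_append.mpr (Or.inr (PySem.List.mem_pyRange_one.mpr (by omega)))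
            · exact List.mem_append.mpr (Or.inl (hold x (by omega) hxhi (by omega)))
          obtain ⟨hpw, hmem⟩ := ih _ (some hi) hsort.2 hres' (by simp)
            (fun c hc => by
              cases hc
              exact ⟨hbound, hcover⟩)
          refine ⟨hpw, fun x => (hmem x).trans ?_⟩
          constructor
          · rintro (h | ⟨q, hq, hcov⟩)
            · rcases List.mem_append.mp h with h | h
              · exact Or.inl h
              · rw [PySem.List.mem_pyRange_one] at h
                exact Or.inr ⟨(lo, hi), List.mem_cons.mpr (Or.inl rfl), ⟨by omega, by omega⟩⟩
            · exact Or.inr ⟨q, List.mem_cons_of_mem _ hq, hcov⟩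
          · rintro (h | ⟨q, hq, hcov⟩)
            · exact Or.inl (List.mem_append.mpr (Or.inl h))
            · rcases List.mem_cons.mp hq with rfl | hq
              · simp only at hcov
                by_cases hxa : a ≤ x
                · exact Or.inl (List.mem_append.mpr (Or.inr
                    (PySem.List.mem_pyRange_one.mpr (by omega))))
                · exact Or.inl (List.mem_append.mpr (Or.inl
                    (hold x hcov.1 hcov.2 (by omega))))
              · exact Or.inr ⟨q, hq, hcov⟩
        cases cur with
        | none =>
            have h0 : res = [] := hnone rfl
            rw [show pvSweep ((lo, hi) :: rest) res none
                = pvSweep rest (res ++ PySem.List.pyRange lo (hi + 1) 1) (some hi) by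
              simp [pvSweep, hempty]]
            exact emit lo (by omega) le_rfl (by simp [h0])
              (fun x h1 _ h3 => absurd h1 (not_le.mpr h3))
        | some c =>
            have hc := hsome c rfl
            by_cases h1 : c < lo
            · rw [show pvSweep ((lo, hi) :: rest) res (some c)
                  = pvSweep rest (res ++ PySem.List.pyRange lo (hi + 1) 1) (some hi) by
                simp [pvSweep, hempty, h1]]
              exact emit lo (by omega) le_rfl
                (fun x hx => by have := hc.1 x hx; omega)
                (fun x hx1 _ hx3 => absurd hx1 (not_le.mpr hx3))
            · by_cases h2 : c < hi
              · rw [show pvSweep ((lo, hi) :: rest) res (some c)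
                    = pvSweep rest (res ++ PySem.List.pyRange (c + 1) (hi + 1) 1) (some hi) by
                  simp [pvSweep, hempty, h1, h2]]
                exact emit (c + 1) (by omega) (by omega)
                  (fun x hx => by have := hc.1 x hx; omega)
                  (fun x hx1 hx2 hx3 =>
                    hc.2 (lo, hi) (List.mem_cons.mpr (Or.inl rfl)) x hx1 (by omega))
              · rw [show pvSweep ((lo, hi) :: rest) res (some c) = pvSweep rest res (some c) by
                  simp [pvSweep, hempty, h1, h2]]
                obtain ⟨hpw, hmem⟩ := ih res (some c) hsort.2 hres (by simp)
                  (fun c' hc' => by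
                    cases hc'
                    exact ⟨hc.1, fun q hq => hc.2 q (List.mem_cons_of_mem _ hq)⟩)
                refine ⟨hpw, fun x => (hmem x).trans ?_⟩
                constructor
                · rintro (h | ⟨q, hq, hcov⟩)
                  · exact Or.inl h
                  · exact Or.inr ⟨q, List.mem_cons_of_mem _ hq, hcov⟩
                · rintro (h | ⟨q, hq, hcov⟩)
                  · exact Or.inl h
                  · rcases List.mem_cons.mp hq with rfl | hq
                    · simp only at hcov
                      exact Or.inl (hc.2 (lo, hi) (List.mem_cons.mpr (Or.inl rfl)) x hcov.1
                        (by omega))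
                    · exact Or.inr ⟨q, hq, hcov⟩

theorem pv_B_pairwise (s : String) : (get_all_trunk_vlans_id_alt s).Pairwise (· < ·) :=
  (pv_sweep_spec (PySem.List.sorted (pvIntervals s) (fun p => p.1) false) [] none
    (PySem.List.sorted_pairwise _ _) (by simp) (fun _ => rfl) (fun c hc => by cases hc)).1

theorem pv_B_mem (s : String) (x : Int) :
    x ∈ get_all_trunk_vlans_id_alt s ↔ ∃ p ∈ pvIntervals s, p.1 ≤ x ∧ x ≤ p.2 := by
  have h := (pv_sweep_spec (PySem.List.sorted (pvIntervals s) (fun p => p.1) false) [] none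
    (PySem.List.sorted_pairwise _ _) (by simp) (fun _ => rfl) (fun c hc => by cases hc)).2 x
  rw [get_all_trunk_vlans_id_alt, h]
  simp only [List.not_mem_nil, false_or]
  constructor
  · rintro ⟨q, hq, hcov⟩
    exact ⟨q, (PySem.List.mem_sorted _ _ _ _).mp hq, hcov⟩
  · rintro ⟨q, hq, hcov⟩
    exact ⟨q, (PySem.List.mem_sorted _ _ _ _).mpr hq, hcov⟩

-- coverage by the intervals = membership in A's (projected) final set
set_option maxHeartbeats 2000000 in
theorem pv_cov_iff (s : String) (x : Int) :
    (∃ p ∈ pvIntervals s, p.1 ≤ x ∧ x ≤ p.2) ↔ x ∈ (pvFinA s).map pvSumInt := by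
  constructor
  · rintro ⟨p, hp, hcov⟩
    obtain ⟨tok, htok, he⟩ := List.mem_map.mp hp
    rw [List.mem_map]
    by_cases hd : pvDash tok = true
    · rw [if_pos hd] at he
      subst he
      refine ⟨PvTok.i x, ?_, rfl⟩
      unfold pvFinA
      refine (pv_foldA_mem _ _ _).mpr (Or.inr ⟨tok, (pv_mem_dlist s tok).mpr ⟨htok, hd⟩, ?_⟩)
      exact List.mem_map_of_mem ((pv_mem_range tok x).mpr hcov)
    · have hf : pvDash tok = false := by simpa using hd
      rw [if_neg (by simp [hf])] at he
      subst he
      simp only at hcov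
      have hx : x = pvParse tok := by omega
      subst hx
      refine ⟨PvTok.s tok, ?_, rfl⟩
      unfold pvFinA
      exact (pv_foldA_mem _ _ _).mpr (Or.inl
        (List.mem_map_of_mem ((pv_mem_singles s tok).mpr ⟨htok, hf⟩)))
  · intro hx
    obtain ⟨y, hy, rfl⟩ := List.mem_map.mp hx
    rcases (pv_foldA_mem _ _ _).mp hy with hy | ⟨d, hd, hy⟩
    · obtain ⟨t, ht, rfl⟩ := List.mem_map.mp hy
      have ht' := (pv_mem_singles s t).mp ht
      refine ⟨(pvParse t, pvParse t), ?_, by simp [pvSumInt]⟩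
      unfold pvIntervals
      rw [List.mem_map]
      exact ⟨t, ht'.1, by rw [if_neg (by simp [ht'.2])]⟩
    · obtain ⟨n, hn, rfl⟩ := List.mem_map.mp hy
      have hd' := (pv_mem_dlist s d).mp hd
      have hr := (pv_mem_range d n).mp hn
      refine ⟨(pvLo d, pvHi d), ?_, by simpa [pvSumInt] using hr⟩
      unfold pvIntervals
      rw [List.mem_map]
      exact ⟨d, hd'.1, by rw [if_pos hd'.2]⟩

-- ===== the verdicts' bodies =====
theorem pv_unchanged (s : String) (hnD : ¬ D_get_all_trunk_vlans_id s) :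
    get_all_trunk_vlans_id s = get_all_trunk_vlans_id_alt s := by
  have hnd1 : ((pvSingles s).map pvParse).Nodup := by
    by_contra hc
    exact hnD (Or.inl hc)
  have hnd2 : ∀ t ∈ pvSingles s, ∀ m ∈ pvToks s, pvDash m = true →
      ¬ (pvLo m ≤ pvParse t ∧ pvParse t ≤ pvHi m) := by
    intro t ht m hm hdash hle
    exact hnD (Or.inr ⟨t, ht, m, hm, hdash, hle.1, hle.2⟩)
  have hsm : ((pvSingles s).map (PvTok.s)).map pvSumInt
      = (pvSingles s).map pvParse := pv_singles_map s
  have hA : ((pvFinA s).map pvSumInt).Nodup := by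
    refine (pv_foldA_nodup _ _ (pv_nodup_singles_inl s) (by rw [hsm]; exact hnd1) ?_).2
    intro t ht d hd hr
    obtain ⟨t', ht', he⟩ := List.mem_map.mp ht
    injection he with he'
    subst he'
    have hdd := (pv_mem_dlist s d).mp hd
    have hrr := (pv_mem_range d _).mp hr
    exact hnd2 t' ht' d hdd.1 hdd.2 ⟨hrr.1, hrr.2⟩
  have hBpw := pv_B_pairwise s
  have hB : (get_all_trunk_vlans_id_alt s).Nodup := hBpw.imp (fun hlt => ne_of_lt hlt)
  have hperm : (get_all_trunk_vlans_id_alt s).Perm ((pvFinA s).map pvSumInt) := by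
    rw [List.perm_ext_iff_of_nodup hB hA]
    intro x
    rw [pv_B_mem, pv_cov_iff]
  rw [pv_A_shape]
  exact PySem.List.sorted_eq_of_perm_of_pairwise_lt _ _ _ hperm hBpw

theorem pv_tight (s : String) (hD : D_get_all_trunk_vlans_id s) :
    get_all_trunk_vlans_id s ≠ get_all_trunk_vlans_id_alt s := by
  have hB : (get_all_trunk_vlans_id_alt s).Nodup := (pv_B_pairwise s).imp (fun hlt => ne_of_lt hlt)
  have hA : ¬ ((pvFinA s).map pvSumInt).Nodup := by
    unfold D_get_all_trunk_vlans_id at hD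
    rcases hD with hD | ⟨t, ht, m, hm, hdash, hlo, hhi⟩
    · intro hnd
      apply hD
      have hpre : ((pvSingles s).map (PvTok.s)).map pvSumInt
          <+: (pvFinA s).map pvSumInt := (pv_foldA_prefix _ _).map _
      have := hnd.sublist hpre.sublist
      rw [pv_singles_map] at this
      exact this
    · intro hnd
      have h1 : (PvTok.s t : PvTok) ∈ pvFinA s := by
        unfold pvFinA
        exact (pv_foldA_mem _ _ _).mpr (Or.inl (List.mem_map_of_mem ht))
      have h2 : (PvTok.i (pvParse t) : PvTok) ∈ pvFinA s := by
        unfold pvFinA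
        refine (pv_foldA_mem _ _ _).mpr (Or.inr ⟨m, ?_, ?_⟩)
        · exact (pv_mem_dlist s m).mpr ⟨hm, hdash⟩
        · exact List.mem_map_of_mem ((pv_mem_range m _).mpr ⟨hlo, hhi⟩)
      have := List.inj_on_of_nodup_map hnd h1 h2 (by rfl)
      exact absurd this (by simp)
  intro he
  apply hA
  rw [pv_A_shape] at he
  have : ((pvFinA s).map pvSumInt).Perm (get_all_trunk_vlans_id_alt s) := by
    rw [← he]
    exact (PySem.List.sorted_perm _ _ _).symm
  exact this.symm.nodup hB

-- ===== VERDICT (by name: the statement is the Claim_ definition above) =====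
theorem get_all_trunk_vlans_id_spec : Claim_unchanged_get_all_trunk_vlans_id := by
  intro s _ _ hnD
  exact pv_unchanged s hnD
theorem get_all_trunk_vlans_id_changed : Claim_changed_get_all_trunk_vlans_id := by
  unfold Claim_changed_get_all_trunk_vlans_id; decide
theorem get_all_trunk_vlans_id_tight : Claim_exact_get_all_trunk_vlans_id := by
  intro s _ _ hD
  exact pv_tight s hD
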